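-- pv_equiv track=rewrite | github.com/Jane11111/Leetcode2021 | 321_2.py | findlst
-- ===== SOURCE A (Python) =====
-- def findlst(nums,count):
--
--     if count == 0:
--         return []
--     lst = []
--     n = len(nums)
--     for i in range(len(nums)):
--
--         num = nums[i]
--         while len(lst)>0 and num>lst[-1] and len(lst)+n-i>count:
--             lst.pop()
--         lst.append(num)
--
--     return lst[:count]
-- ===== SOURCE B (Python) =====
-- def findlst(nums, count):
--     if count <= 0:
--         return []
--     n = len(nums)
--     if count >= n:
--         return list(nums)
--     # ng[i] = smallest j > i with nums[j] > nums[i], or n if there is none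
--     ng = [n] * n
--     for i in range(n - 2, -1, -1):
--         j = i + 1
--         while j < n and nums[j] <= nums[i]:
--             j = ng[j]
--         ng[i] = j
--     res = []
--     s = 0
--     for j in range(count):
--         e = n - count + j  # rightmost index usable for this pick
--         b = s
--         while ng[b] <= e:
--             b = ng[b]
--         res.append(nums[b])
--         s = b + 1
--     return res
-- ===== Notes on version B (the rewrite author's own statement) =====
-- stated objective: alternative
-- what changed: Replaced the single-pass budgeted monotonic stack (pop while bigger and enough elements remain, then slice) by a two-phase algorithm: precompute next-strictly-greater jump pointers, then build the answer by repeated leftmost-maximum window picks found by climbing those pointers.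
-- outside the precondition, e.g. on findlst([3, 1, 2], -1): A returns [3], B returns []
import Mathlib
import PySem

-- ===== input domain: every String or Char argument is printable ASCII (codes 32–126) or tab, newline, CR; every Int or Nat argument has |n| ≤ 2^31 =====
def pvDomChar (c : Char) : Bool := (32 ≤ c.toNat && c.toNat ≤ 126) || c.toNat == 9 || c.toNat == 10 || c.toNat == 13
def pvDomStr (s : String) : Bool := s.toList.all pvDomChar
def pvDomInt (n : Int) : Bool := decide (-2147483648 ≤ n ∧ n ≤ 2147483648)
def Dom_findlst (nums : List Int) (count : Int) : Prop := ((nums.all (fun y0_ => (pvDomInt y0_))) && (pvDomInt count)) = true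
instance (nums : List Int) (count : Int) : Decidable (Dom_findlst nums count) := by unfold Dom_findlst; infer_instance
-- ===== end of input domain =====

-- B replaces A's one-pass budgeted monotonic stack by a two-phase algorithm: precompute next-strictly-greater jump pointers, then pick each output element as the leftmost maximum of its feasible window by climbing those pointers (alternative algorithm, same results).

-- ===== PORT A =====
-- the inner 'while len(lst)>0 and num>lst[-1] and len(lst)+n-i>count: lst.pop()' loop;
-- rem = n - i (number of elements from position i to the end, inclusive)
def popA (lst : List Int) (num : Int) (rem : Int) (count : Int) : List Int :=
  match lst with
  | [] => []
  | x :: xs =>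
    if num > (x :: xs).getLast (by simp) ∧ ((x :: xs).length : Int) + rem > count then
      popA (x :: xs).dropLast num rem count
    else x :: xs
termination_by lst.length
decreasing_by simp

-- the 'for i in range(len(nums))' loop, ported as structural recursion on the remaining
-- list (num = nums[i]; n - i = length of the remaining list including the current element)
def goA (lst : List Int) (xs : List Int) (count : Int) : List Int :=
  match xs with
  | [] => lst
  | x :: rest => goA (popA lst x ((rest.length : Int) + 1) count ++ [x]) rest count

def findlst (nums : List Int) (count : Int) : List Int :=
  if count = 0 then []
  else PySem.List.slice (goA [] nums count) none (some count)   -- lst[:count]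

-- ===== PORT B =====
-- the inner 'while j < n and nums[j] <= nums[i]: j = ng[j]' loop; the loop strictly
-- increases j (ng[j] > j), so fuel = len(nums) steps always suffice — a fuel-counted
-- transcription of Source B's while loop
def jumpNg (nums ng : List Int) (x : Int) : Nat → Int → Int
  | 0, j => j
  | fuel + 1, j =>
    if j < (nums.length : Int) ∧ PySem.List.pyGetD nums j 0 ≤ x then
      jumpNg nums ng x fuel (PySem.List.pyGetD ng j 0)
    else j

-- ng = [n]*n; for i in range(n-2, -1, -1): ... ng[i] = j
def buildNg (nums : List Int) : List Int :=
  (PySem.List.pyRange ((nums.length : Int) - 2) (-1) (-1)).foldl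
    (fun ng i =>
      PySem.List.pySetD ng i (jumpNg nums ng (PySem.List.pyGetD nums i 0) nums.length (i + 1)))
    (List.replicate nums.length (nums.length : Int))

-- the 'while ng[b] <= e: b = ng[b]' climb; b strictly increases, fuel = len(nums) suffices
def climbNg (ng : List Int) (e : Int) : Nat → Int → Int
  | 0, b => b
  | fuel + 1, b =>
    if PySem.List.pyGetD ng b 0 ≤ e then climbNg ng e fuel (PySem.List.pyGetD ng b 0)
    else b

def findlst_alt (nums : List Int) (count : Int) : List Int :=
  if count ≤ 0 then []
  else if (nums.length : Int) ≤ count then nums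
  else
    let n : Int := (nums.length : Int)
    let ng := buildNg nums
    ((PySem.List.pyRange 0 count 1).foldl
      (fun st j =>
        let e := n - count + j
        let b := climbNg ng e nums.length st.2
        (st.1 ++ [PySem.List.pyGetD nums b 0], b + 1))
      (([] : List Int), (0 : Int))).1

-- ===== PRECONDITION & SPEC =====
-- Pre_ excludes negative count, outside the task's natural domain: there A's 'lst[:count]'
-- negative-slice accident can return a nonempty list while B naturally returns [].
def Pre_findlst (nums : List Int) (count : Int) : Prop := 0 ≤ count
instance (nums : List Int) (count : Int) : Decidable (Pre_findlst nums count) := by unfold Pre_findlst; infer_instance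
def pvWitness_findlst : List Int × Int := ([2, 1, 3, 1], 2)

def Spec_findlst (nums : List Int) (count : Int) (out : List Int) : Prop := out = findlst_alt nums count
instance (nums : List Int) (count : Int) (out : List Int) : Decidable (Spec_findlst nums count out) := by unfold Spec_findlst; infer_instance

-- ===== CLAIM (what is proved, stated in full; the proofs are below) =====
def Claim_equal_findlst : Prop := ∀ (nums : List Int) (count : Int), Dom_findlst nums count → Pre_findlst nums count → Spec_findlst nums count (findlst nums count)

-- ===== LEMMAS AND PROOFS =====

-- B's leftmost-argmax loop, abbreviated for the proofs
def bestFold (nums : List Int) (limit a b0 : Int) : Int :=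
  (PySem.List.pyRange a limit 1).foldl
    (fun b i => if PySem.List.pyGetD nums i 0 > PySem.List.pyGetD nums b 0 then i else b) b0

-- proof-only reference: the recursive leftmost-max-in-window greedy (both programs are
-- proved equal to this)
def gspec (nums : List Int) (count : Int) : List Int :=
  if count ≤ 0 then []
  else if (nums.length : Int) ≤ count then nums
  else
    let p := bestFold nums ((nums.length : Int) - count + 1) 1 0
    PySem.List.pyGetD nums p 0 :: gspec (PySem.List.slice nums (some (p + 1)) none) (count - 1)
termination_by count.toNat
decreasing_by omega

-- goP: goA generalized with an 'extra' suffix length, for splitting the input list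
def goP (lst : List Int) (xs : List Int) (extra : Int) (count : Int) : List Int :=
  match xs with
  | [] => lst
  | x :: rest => goP (popA lst x ((rest.length : Int) + 1 + extra) count ++ [x]) rest extra count

theorem goA_eq_goP (xs lst : List Int) (c : Int) : goA lst xs c = goP lst xs 0 c := by
  induction xs generalizing lst with
  | nil => rfl
  | cons x rest ih => simp [goA, goP, ih]

theorem goP_append (u v lst : List Int) (extra c : Int) :
    goP lst (u ++ v) extra c = goP (goP lst u ((v.length : Int) + extra) c) v extra c := by
  induction u generalizing lst with
  | nil => rfl
  | cons x rest ih =>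
    simp only [List.cons_append, goP]
    have hR : ((rest ++ v).length : Int) + 1 + extra = (rest.length : Int) + 1 + ((v.length : Int) + extra) := by
      push_cast [List.length_append]; ring
    rw [hR, ih]

theorem popA_no (lst : List Int) (x rem c : Int) (h : ¬ ((lst.length : Int) + rem > c)) :
    popA lst x rem c = lst := by
  cases lst with
  | nil => rw [popA]
  | cons a l => rw [popA, if_neg]; intro hc; exact h hc.2

theorem goA_no_pop (xs lst : List Int) (c : Int) (h : (lst.length : Int) + xs.length ≤ c) :
    goA lst xs c = lst ++ xs := by
  induction xs generalizing lst with
  | nil => simp [goA]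
  | cons x rest ih =>
    simp only [List.length_cons] at h
    push_cast at h
    rw [goA, popA_no _ _ _ _ (by omega), ih _ (by simp; omega)]
    simp

theorem popA_subset (lst : List Int) (x rem c : Int) : ∀ y ∈ popA lst x rem c, y ∈ lst := by
  match lst with
  | [] => rw [popA]; intro y hy; exact absurd hy (List.not_mem_nil)
  | a :: l =>
    rw [popA]
    split
    · intro y hy
      exact List.dropLast_subset _ (popA_subset (a :: l).dropLast x rem c y hy)
    · intro y hy; exact hy
termination_by lst.length
decreasing_by simp

theorem goP_subset (xs lst : List Int) (extra c : Int) :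
    ∀ y ∈ goP lst xs extra c, y ∈ lst ∨ y ∈ xs := by
  induction xs generalizing lst with
  | nil => intro y hy; exact Or.inl hy
  | cons x rest ih =>
    intro y hy
    rw [goP] at hy
    rcases ih _ y hy with h | h
    · rcases List.mem_append.1 h with h | h
      · exact Or.inl (popA_subset _ _ _ _ y h)
      · simp at h; subst h; simp
    · simp [h]

theorem popA_empty (lst : List Int) (x rem c : Int)
    (hlt : ∀ y ∈ lst, y < x) (hrem : c < 1 + rem) : popA lst x rem c = [] := by
  match lst with
  | [] => rw [popA]
  | a :: l =>
    rw [popA, if_pos ⟨hlt _ (List.getLast_mem (by simp)), by simp only [List.length_cons]; push_cast; omega⟩]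
    exact popA_empty _ x rem c (fun y hy => hlt y (List.dropLast_subset _ hy)) hrem
termination_by lst.length
decreasing_by simp

theorem popA_cons_head (t : List Int) (h x rem c : Int) (hx : c ≤ rem → x ≤ h) :
    popA (h :: t) x rem c = h :: popA t x rem (c - 1) := by
  match t with
    | [] =>
      rw [popA, popA]
      simp only [List.getLast_singleton, List.length_cons, List.length_nil]
      rw [if_neg]
      rintro ⟨h1, h2⟩
      by_cases hr : c ≤ rem
      · exact absurd h1 (not_lt.2 (hx hr))
      · push_cast at h2; omega
    | b :: l =>
      rw [popA, popA]
      have hg : (h :: b :: l).getLast (by simp) = (b :: l).getLast (by simp) :=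
        List.getLast_cons (by simp)
      by_cases hcond : x > (b :: l).getLast (by simp) ∧ ((b :: l).length : Int) + rem > c - 1
      · have hc2 := hcond.2
        rw [if_pos ⟨by rw [hg]; exact hcond.1,
            by simp only [List.length_cons] at hc2 ⊢; push_cast at hc2 ⊢; omega⟩,
          if_pos hcond]
        have hdl : (h :: b :: l).dropLast = h :: (b :: l).dropLast := rfl
        rw [hdl]
        exact popA_cons_head (b :: l).dropLast h x rem c hx
      · rw [if_neg, if_neg hcond]
        rintro ⟨h1, h2⟩
        exact hcond ⟨by rw [hg] at h1; exact h1, by simp only [List.length_cons] at h2 ⊢; push_cast at h2 ⊢; omega⟩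
termination_by t.length
decreasing_by simp

theorem goP_head (v : List Int) (t : List Int) (h : Int) (extra c : Int)
    (hv : ∀ k, (hk : k < v.length) → c ≤ (v.length : Int) - k + extra → v[k] ≤ h) :
    goP (h :: t) v extra c = h :: goP t v extra (c - 1) := by
  induction v generalizing t with
  | nil => rfl
  | cons x rest ih =>
    rw [goP, goP]
    rw [popA_cons_head _ _ _ _ _ (fun hr => by
      have := hv 0 (by simp) (by simp only [List.length_cons]; push_cast at hr ⊢; omega)
      simpa using this)]
    rw [List.cons_append]
    exact ih _ (fun k hk hc => by
      have := hv (k + 1) (by simpa using Nat.succ_lt_succ hk) (by simp only [List.length_cons]; push_cast at hc ⊢; omega)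
      simpa using this)

theorem goP_prefix_max (u : List Int) (m : Int) (lst : List Int) (extra c : Int)
    (hlst : ∀ y ∈ lst, y < m) (hu : ∀ y ∈ u, y < m) (hc : c < 2 + extra) :
    goP lst (u ++ [m]) extra c = [m] := by
  rw [goP_append]
  rw [goP]
  have hmem : ∀ y ∈ goP lst u ((([m] : List Int).length : Int) + extra) c, y < m := by
    intro y hy
    rcases goP_subset _ _ _ _ y hy with h | h
    · exact hlst y h
    · exact hu y h
  rw [show goP (popA (goP lst u ((([m] : List Int).length : Int) + extra) c) m
        (((([] : List Int)).length : Int) + 1 + extra) c ++ [m]) [] extra c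
      = popA (goP lst u ((([m] : List Int).length : Int) + extra) c) m
        (((([] : List Int)).length : Int) + 1 + extra) c ++ [m] from rfl]
  rw [popA_empty _ _ _ _ hmem (by omega)]
  rfl

-- characterization of B's leftmost-argmax loop
theorem bestLoop_spec (nums : List Int) (limit : Int) (n : Nat) (a b0 : Int)
    (hn : (limit - a).toNat ≤ n) (ha : 1 ≤ a) (hb0 : 0 ≤ b0 ∧ b0 < a)
    (hmax : ∀ k : Int, 0 ≤ k → k < a → PySem.List.pyGetD nums k 0 ≤ PySem.List.pyGetD nums b0 0)
    (hstrict : ∀ k : Int, 0 ≤ k → k < b0 → PySem.List.pyGetD nums k 0 < PySem.List.pyGetD nums b0 0) :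
    (0 ≤ bestFold nums limit a b0 ∧ bestFold nums limit a b0 < max a limit) ∧
    (∀ k : Int, 0 ≤ k → k < max a limit →
      PySem.List.pyGetD nums k 0 ≤ PySem.List.pyGetD nums (bestFold nums limit a b0) 0) ∧
    (∀ k : Int, 0 ≤ k → k < bestFold nums limit a b0 →
      PySem.List.pyGetD nums k 0 < PySem.List.pyGetD nums (bestFold nums limit a b0) 0) := by
  induction n generalizing a b0 with
  | zero =>
    have hla : limit ≤ a := by omega
    unfold bestFold
    rw [PySem.List.pyRange_one_eq_nil hla]
    simp only [List.foldl_nil]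
    exact ⟨⟨hb0.1, by omega⟩, fun k hk1 hk2 => hmax k hk1 (by omega), hstrict⟩
  | succ n ih =>
    by_cases hla : limit ≤ a
    · unfold bestFold
      rw [PySem.List.pyRange_one_eq_nil hla]
      simp only [List.foldl_nil]
      exact ⟨⟨hb0.1, by omega⟩, fun k hk1 hk2 => hmax k hk1 (by omega), hstrict⟩
    · push_neg at hla
      have hstep : bestFold nums limit a b0 = bestFold nums limit (a + 1)
          (if PySem.List.pyGetD nums a 0 > PySem.List.pyGetD nums b0 0 then a else b0) := by
        unfold bestFold
        rw [PySem.List.pyRange_one_cons hla, List.foldl_cons]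
      have hmm : max (a + 1) limit = max a limit := by omega
      by_cases hcmp : PySem.List.pyGetD nums a 0 > PySem.List.pyGetD nums b0 0
      · rw [hstep, if_pos hcmp]
        have := ih (a + 1) a (by omega) (by omega) ⟨by omega, by omega⟩
          (fun k hk1 hk2 => by
            by_cases hka : k < a
            · exact le_of_lt (lt_of_le_of_lt (hmax k hk1 hka) hcmp)
            · have hke : k = a := by omega
              subst hke; exact le_refl _)
          (fun k hk1 hk2 => lt_of_le_of_lt (hmax k hk1 hk2) hcmp)
        rwa [hmm] at this
      · rw [hstep, if_neg hcmp]
        have := ih (a + 1) b0 (by omega) (by omega) ⟨hb0.1, by omega⟩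
          (fun k hk1 hk2 => by
            by_cases hka : k < a
            · exact hmax k hk1 hka
            · have hke : k = a := by omega
              subst hke; exact not_lt.1 hcmp)
          hstrict
        rwa [hmm] at this

theorem main_lemma (count : Int) (nums : List Int) (hc : 0 ≤ count) :
    PySem.List.slice (goA [] nums count) none (some count) = gspec nums count := by
  by_cases h0 : count ≤ 0
  · have hc0 : count = 0 := le_antisymm h0 hc
    subst hc0
    rw [gspec, if_pos (le_refl 0), PySem.List.slice_to _ (le_refl 0)]
    simp
  · push_neg at h0
    by_cases hbig : (nums.length : Int) ≤ count
    · rw [gspec, if_neg (by omega), if_pos hbig]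
      rw [goA_no_pop nums [] count (by simpa using hbig)]
      rw [PySem.List.slice_to _ hc, List.nil_append]
      exact List.take_of_length_le (by omega)
    · push_neg at hbig
      -- main case: 1 ≤ count < nums.length
      have hlim1 : 1 ≤ (nums.length : Int) - count + 1 := by omega
      have hspec := bestLoop_spec nums ((nums.length : Int) - count + 1)
        ((nums.length : Int) - count).toNat 1 0 (by omega) (le_refl 1) ⟨le_refl 0, by omega⟩
        (fun k hk1 hk2 => by
          have hk0 : k = 0 := by omega
          subst hk0; exact le_refl _)
        (fun k hk1 hk2 => absurd hk2 (by omega))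
      rw [show max 1 ((nums.length : Int) - count + 1) = (nums.length : Int) - count + 1 by omega] at hspec
      obtain ⟨⟨hp0, hp1⟩, hmax, hstrict⟩ := hspec
      set p : Int := bestFold nums ((nums.length : Int) - count + 1) 1 0 with hpdef
      have hPlt : p.toNat < nums.length := by omega
      have hmg : PySem.List.pyGetD nums p 0 = nums[p.toNat] :=
        PySem.List.pyGetD_eq_getElem nums 0 hp0 (by omega)
      -- split nums = (take p ++ [nums[p]]) ++ drop (p+1)
      have hsplit : nums = (nums.take p.toNat ++ [nums[p.toNat]]) ++ nums.drop (p.toNat + 1) := by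
        rw [List.append_assoc, List.singleton_append, List.getElem_cons_drop,
          List.take_append_drop]
      have hsuflen : ((nums.drop (p.toNat + 1)).length : Int) = (nums.length : Int) - p - 1 := by
        rw [List.length_drop]; omega
      -- A side: reduce the stack run
      have hA : goA [] nums count
          = nums[p.toNat] :: goA [] (nums.drop (p.toNat + 1)) (count - 1) := by
        conv_lhs => rw [hsplit]
        rw [goA_eq_goP, goP_append]
        rw [goP_prefix_max _ _ _ _ _ (by intro y hy; cases hy)
          (by
            intro y hy
            rcases List.mem_take_iff_getElem.1 hy with ⟨k, hk, hky⟩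
            have hk' : k < p.toNat := by omega
            have := hstrict k (by omega) (by omega)
            rw [hmg, PySem.List.pyGetD_eq_getElem nums 0 (by omega) (by omega)] at this
            simpa [← hky, Int.toNat_natCast] using this)
          (by omega)]
        rw [goP_head _ _ _ _ _ (by
          intro k hk hck
          have hidx : 0 ≤ (p + 1 + (k : Int)) := by omega
          have hidx2 : p + 1 + (k : Int) < (nums.length : Int) - count + 1 := by omega
          have := hmax (p + 1 + (k : Int)) hidx hidx2
          rw [hmg, PySem.List.pyGetD_eq_getElem nums 0 hidx (by omega)] at this
          have hgd : (nums.drop (p.toNat + 1))[k] = nums[(p + 1 + (k : Int)).toNat] := by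
            rw [List.getElem_drop]
            congr 1
            omega
          rw [hgd]
          exact this)]
        rw [← goA_eq_goP]
      -- reduce one step of gspec
      rw [gspec, if_neg (by omega), if_neg (by omega)]
      simp only []
      rw [hA]
      rw [PySem.List.slice_to _ hc]
      have hcnt : count.toNat = (count - 1).toNat + 1 := by omega
      rw [hcnt, List.take_succ_cons, ← PySem.List.slice_to (goA [] (nums.drop (p.toNat + 1)) (count - 1)) (by omega : (0:Int) ≤ count - 1)]
      rw [main_lemma (count - 1) (nums.drop (p.toNat + 1)) (by omega)]
      have hslice : PySem.List.slice nums (some (p + 1)) none = nums.drop (p.toNat + 1) := by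
        rw [PySem.List.slice_from nums (by omega)]
        congr 1
        omega
      rw [hmg, hslice]
termination_by count.toNat
decreasing_by omega


-- ===== equivalence of the ported B with gspec =====

-- partial correctness region of an ng list: entries for indices above lo are correct
def NgPart (nums ng : List Int) (lo : Int) : Prop :=
  ∀ i : Int, lo < i → i < (nums.length : Int) →
    i < PySem.List.pyGetD ng i 0 ∧
    PySem.List.pyGetD ng i 0 ≤ (nums.length : Int) ∧
    (PySem.List.pyGetD ng i 0 < (nums.length : Int) →
      PySem.List.pyGetD nums (PySem.List.pyGetD ng i 0) 0 > PySem.List.pyGetD nums i 0) ∧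
    (∀ k : Int, i < k → k < PySem.List.pyGetD ng i 0 →
      PySem.List.pyGetD nums k 0 ≤ PySem.List.pyGetD nums i 0)

theorem jumpNg_spec (nums ng : List Int) (x lo : Int) (fuel : Nat) (j : Int)
    (hpart : NgPart nums ng lo) (hj : lo < j) (hjn : j ≤ (nums.length : Int))
    (hfuel : ((nums.length : Int) - j).toNat ≤ fuel) :
    j ≤ jumpNg nums ng x fuel j ∧ jumpNg nums ng x fuel j ≤ (nums.length : Int) ∧
    (jumpNg nums ng x fuel j < (nums.length : Int) →
      PySem.List.pyGetD nums (jumpNg nums ng x fuel j) 0 > x) ∧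
    (∀ k : Int, j ≤ k → k < jumpNg nums ng x fuel j → PySem.List.pyGetD nums k 0 ≤ x) := by
  induction fuel generalizing j with
  | zero =>
    have hje : j = (nums.length : Int) := by omega
    rw [jumpNg]
    exact ⟨le_refl j, by omega, by omega, fun k hk1 hk2 => by omega⟩
  | succ fuel ih =>
    rw [jumpNg]
    by_cases hcond : j < (nums.length : Int) ∧ PySem.List.pyGetD nums j 0 ≤ x
    · rw [if_pos hcond]
      obtain ⟨hg1, hg2, _, hg4⟩ := hpart j hj hcond.1
      obtain ⟨ih1, ih2, ih3, ih4⟩ := ih (PySem.List.pyGetD ng j 0) (by omega) hg2 (by omega)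
      refine ⟨by omega, ih2, ih3, ?_⟩
      intro k hk1 hk2
      by_cases hkj : k = j
      · subst hkj; exact hcond.2
      · by_cases hkg : k < PySem.List.pyGetD ng j 0
        · exact le_trans (hg4 k (by omega) hkg) hcond.2
        · exact ih4 k (by omega) hk2
    · rw [if_neg hcond]
      refine ⟨le_refl j, hjn, ?_, fun k hk1 hk2 => by omega⟩
      intro hjlt
      rcases not_and_or.1 hcond with h | h
      · exact absurd hjlt h
      · omega

theorem length_buildNg_fold (nums : List Int) (xs : List Int) (ng : List Int)
    (h : ng.length = nums.length) :
    (xs.foldl (fun ng i =>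
      PySem.List.pySetD ng i (jumpNg nums ng (PySem.List.pyGetD nums i 0) nums.length (i + 1))) ng).length
      = nums.length := by
  induction xs generalizing ng with
  | nil => exact h
  | cons a l ih => exact ih _ (by rw [PySem.List.length_pySetD]; exact h)

theorem buildNg_fold_spec (nums : List Int) (t : Nat) (a : Int) (ng : List Int)
    (ha : a = (t : Int) - 1) (han : a ≤ (nums.length : Int) - 2)
    (hlen : ng.length = nums.length) (hpart : NgPart nums ng a) :
    NgPart nums
      ((PySem.List.pyRange a (-1) (-1)).foldl (fun ng i =>
        PySem.List.pySetD ng i (jumpNg nums ng (PySem.List.pyGetD nums i 0) nums.length (i + 1))) ng)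
      (-1) := by
  induction t generalizing a ng with
  | zero =>
    rw [PySem.List.pyRange_neg_one_eq_nil (by omega)]
    simpa using (by
      intro i hi1 hi2
      exact hpart i (by omega) hi2)
  | succ t ih =>
    have ha0 : 0 ≤ a := by omega
    rw [PySem.List.pyRange_neg_one_cons (by omega)]
    rw [List.foldl_cons]
    apply ih (a - 1) _ (by omega) (by omega)
    · rw [PySem.List.length_pySetD]; exact hlen
    · -- the updated list is correct above a - 1
      intro i hi1 hi2
      have hset : ∀ m : Int, 0 ≤ m → m < (nums.length : Int) →
          PySem.List.pyGetD (PySem.List.pySetD ng a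
            (jumpNg nums ng (PySem.List.pyGetD nums a 0) nums.length (a + 1))) m 0
          = if m = a then jumpNg nums ng (PySem.List.pyGetD nums a 0) nums.length (a + 1)
            else PySem.List.pyGetD ng m 0 := by
        intro m hm1 hm2
        have hmN : m.toNat < ng.length := by omega
        have haN : a.toNat < ng.length := by omega
        rw [PySem.List.pySetD_of_nonneg _ _ ha0,
          PySem.List.pyGetD_eq_getElem _ _ hm1 (by simp [List.length_set]; omega)]
        rw [List.getElem_set]
        by_cases hma : m = a
        · rw [if_pos (by omega : a.toNat = m.toNat), if_pos hma]
        · rw [if_neg (by omega : ¬ a.toNat = m.toNat), if_neg hma,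
            PySem.List.pyGetD_eq_getElem _ _ hm1 (by omega)]
      by_cases hia : i = a
      · subst hia
        rw [hset i (by omega) hi2, if_pos rfl]
        obtain ⟨h1, h2, h3, h4⟩ := jumpNg_spec nums ng (PySem.List.pyGetD nums i 0) i
          nums.length (i + 1) hpart (by omega) (by omega) (by omega)
        refine ⟨by omega, h2, h3, ?_⟩
        intro k hk1 hk2
        exact h4 k (by omega) hk2
      · rw [hset i (by omega) hi2, if_neg hia]
        obtain ⟨h1, h2, h3, h4⟩ := hpart i (by omega) hi2
        exact ⟨h1, h2, h3, h4⟩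

theorem buildNg_spec (nums : List Int) (h2 : 2 ≤ nums.length) :
    (buildNg nums).length = nums.length ∧ NgPart nums (buildNg nums) (-1) := by
  constructor
  · unfold buildNg
    rw [PySem.List.pyRange_neg_one_eq_reverse]
    exact length_buildNg_fold nums _ _ (by simp)
  · unfold buildNg
    apply buildNg_fold_spec nums (nums.length - 1) ((nums.length : Int) - 2)
      (List.replicate nums.length ((nums.length : Int)))
      (by omega) (by omega) (by simp)
    -- initial list: only index nums.length - 1 lies above nums.length - 2; its entry is n
    intro i hi1 hi2
    have hrep : PySem.List.pyGetD (List.replicate nums.length ((nums.length : Int))) i 0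
        = (nums.length : Int) := by
      rw [PySem.List.pyGetD_eq_getElem _ _ (by omega) (by simp; omega)]
      simp
    rw [hrep]
    exact ⟨by omega, le_refl _, by omega, fun k hk1 hk2 => by omega⟩

theorem climbNg_spec (nums ng : List Int) (e s : Int) (fuel : Nat) (b : Int)
    (hpart : NgPart nums ng (-1)) (hs : 0 ≤ s) (hsb : s ≤ b) (hbe : b ≤ e)
    (hen : e < (nums.length : Int)) (hfuel : (e - b).toNat ≤ fuel)
    (hprev : ∀ k : Int, s ≤ k → k < b → PySem.List.pyGetD nums k 0 < PySem.List.pyGetD nums b 0) :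
    s ≤ climbNg ng e fuel b ∧ climbNg ng e fuel b ≤ e ∧
    (∀ k : Int, s ≤ k → k < climbNg ng e fuel b →
      PySem.List.pyGetD nums k 0 < PySem.List.pyGetD nums (climbNg ng e fuel b) 0) ∧
    (∀ k : Int, s ≤ k → k ≤ e →
      PySem.List.pyGetD nums k 0 ≤ PySem.List.pyGetD nums (climbNg ng e fuel b) 0) := by
  induction fuel generalizing b with
  | zero =>
    have hbe' : b = e := by omega
    subst hbe'
    rw [climbNg]
    obtain ⟨g1, g2, g3, g4⟩ := hpart b (by omega) (by omega)
    refine ⟨hsb, le_refl _, hprev, ?_⟩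
    intro k hk1 hk2
    rcases lt_trichotomy k b with h | h | h
    · exact le_of_lt (hprev k hk1 h)
    · subst h; exact le_refl _
    · omega
  | succ fuel ih =>
    rw [climbNg]
    obtain ⟨g1, g2, g3, g4⟩ := hpart b (by omega) (by omega)
    by_cases hcond : PySem.List.pyGetD ng b 0 ≤ e
    · rw [if_pos hcond]
      have hgb : PySem.List.pyGetD nums (PySem.List.pyGetD ng b 0) 0 > PySem.List.pyGetD nums b 0 :=
        g3 (by omega)
      apply ih (PySem.List.pyGetD ng b 0) (by omega) hcond (by omega)
      intro k hk1 hk2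
      rcases lt_trichotomy k b with h | h | h
      · exact lt_trans (hprev k hk1 h) hgb
      · subst h; exact hgb
      · exact lt_of_le_of_lt (g4 k h hk2) hgb
    · rw [if_neg hcond]
      refine ⟨hsb, hbe, hprev, ?_⟩
      intro k hk1 hk2
      rcases lt_trichotomy k b with h | h | h
      · exact le_of_lt (hprev k hk1 h)
      · subst h; exact le_refl _
      · exact g4 k h (by omega)

-- transfer pyGetD through List.drop
theorem pyGetD_drop (nums : List Int) (s t : Int) (hs : 0 ≤ s) (ht : 0 ≤ t)
    (h : s + t < (nums.length : Int)) :
    PySem.List.pyGetD (nums.drop s.toNat) t 0 = PySem.List.pyGetD nums (s + t) 0 := by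
  rw [PySem.List.pyGetD_eq_getElem _ _ ht (by rw [List.length_drop]; omega),
    PySem.List.pyGetD_eq_getElem _ _ (by omega) (by omega)]
  rw [List.getElem_drop]
  congr 1
  omega

-- one gspec step, stated with a global leftmost argmax of the window [s, e]
theorem gspec_step (nums : List Int) (r s b : Int) (hr : 1 ≤ r) (hs : 0 ≤ s)
    (hse : s ≤ (nums.length : Int) - r)
    (hb1 : s ≤ b) (hb2 : b ≤ (nums.length : Int) - r)
    (hmax : ∀ k : Int, s ≤ k → k ≤ (nums.length : Int) - r →
      PySem.List.pyGetD nums k 0 ≤ PySem.List.pyGetD nums b 0)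
    (hstrict : ∀ k : Int, s ≤ k → k < b →
      PySem.List.pyGetD nums k 0 < PySem.List.pyGetD nums b 0) :
    gspec (nums.drop s.toNat) r
      = PySem.List.pyGetD nums b 0 :: gspec (nums.drop (b + 1).toNat) (r - 1) := by
  have hlen : ((nums.drop s.toNat).length : Int) = (nums.length : Int) - s := by
    rw [List.length_drop]; omega
  by_cases hall : ((nums.drop s.toNat).length : Int) ≤ r
  · -- the window [s, e] is the single element s; everything from s on is taken one by one
    have hsr : s = (nums.length : Int) - r := by omega
    have hbs : b = s := by omega
    rw [hbs]
    rw [gspec, if_neg (by omega), if_pos hall]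
    have hsn : s.toNat < nums.length := by omega
    rw [show nums.drop s.toNat = nums[s.toNat] :: nums.drop (s.toNat + 1) from
      (List.getElem_cons_drop hsn).symm]
    rw [PySem.List.pyGetD_eq_getElem _ _ hs (by omega)]
    congr 1
    rw [show (s + 1).toNat = s.toNat + 1 by omega]
    by_cases hr1 : r - 1 ≤ 0
    · rw [gspec, if_pos hr1, List.drop_eq_nil_of_le (by omega)]
    · rw [gspec, if_neg hr1, if_pos (by rw [List.length_drop]; omega)]
  · push_neg at hall
    rw [gspec, if_neg (by omega), if_neg (by omega)]
    simp only []
    -- the local pick of gspec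
    have hlim1 : 1 ≤ ((nums.drop s.toNat).length : Int) - r + 1 := by omega
    have hspec := bestLoop_spec (nums.drop s.toNat) (((nums.drop s.toNat).length : Int) - r + 1)
      (((nums.drop s.toNat).length : Int) - r).toNat 1 0 (by omega) (le_refl 1)
      ⟨le_refl 0, by omega⟩
      (fun k hk1 hk2 => by
        have hk0 : k = 0 := by omega
        subst hk0; exact le_refl _)
      (fun k hk1 hk2 => absurd hk2 (by omega))
    rw [show max 1 (((nums.drop s.toNat).length : Int) - r + 1)
      = ((nums.drop s.toNat).length : Int) - r + 1 by omega] at hspec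
    obtain ⟨⟨hp0, hp1⟩, hpmax, hpstrict⟩ := hspec
    set p : Int := bestFold (nums.drop s.toNat) (((nums.drop s.toNat).length : Int) - r + 1) 1 0
      with hpdef
    -- p (local) and b (global) name the same position: s + p = b
    have hglobmax : ∀ k : Int, s ≤ k → k ≤ (nums.length : Int) - r →
        PySem.List.pyGetD nums k 0 ≤ PySem.List.pyGetD nums (s + p) 0 := by
      intro k hk1 hk2
      have := hpmax (k - s) (by omega) (by omega)
      rw [pyGetD_drop nums s (k - s) hs (by omega) (by omega),
        pyGetD_drop nums s p hs hp0 (by omega)] at this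
      simpa [show s + (k - s) = k by omega] using this
    have hglobstrict : ∀ k : Int, s ≤ k → k < s + p →
        PySem.List.pyGetD nums k 0 < PySem.List.pyGetD nums (s + p) 0 := by
      intro k hk1 hk2
      have := hpstrict (k - s) (by omega) (by omega)
      rw [pyGetD_drop nums s (k - s) hs (by omega) (by omega),
        pyGetD_drop nums s p hs hp0 (by omega)] at this
      simpa [show s + (k - s) = k by omega] using this
    have hpb : s + p = b := by
      rcases lt_trichotomy (s + p) b with h | h | h
      · have h1 := hstrict (s + p) (by omega) h
        have h2 := hglobmax b hb1 hb2
        omega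
      · exact h
      · have h1 := hglobstrict b hb1 h
        have h2 := hmax (s + p) (by omega) (by omega)
        omega
    rw [pyGetD_drop nums s p hs hp0 (by omega), hpb]
    have hdrop : PySem.List.slice (nums.drop s.toNat) (some (p + 1)) none
        = nums.drop (b + 1).toNat := by
      rw [PySem.List.slice_from _ (by omega), List.drop_drop]
      congr 1
      omega
    rw [hdrop]

-- the pick loop of the port equals gspec on the corresponding suffix
theorem pickLoop_spec (nums ng : List Int) (count : Int)
    (hpart : NgPart nums ng (-1)) (hcnt : 1 ≤ count) (hcn : count < (nums.length : Int)) :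
    ∀ (t : Nat) (j0 s : Int) (res : List Int), j0 = count - (t : Int) → 0 ≤ j0 →
    0 ≤ s → s ≤ (nums.length : Int) - count + j0 →
    ((PySem.List.pyRange j0 count 1).foldl
      (fun st j =>
        let e := (nums.length : Int) - count + j
        let b := climbNg ng e nums.length st.2
        (st.1 ++ [PySem.List.pyGetD nums b 0], b + 1))
      (res, s)).1
    = res ++ gspec (nums.drop s.toNat) (count - j0) := by
  intro t
  induction t with
  | zero =>
    intro j0 s res hj0 _ _ _
    rw [PySem.List.pyRange_one_eq_nil (by omega)]
    rw [show count - j0 = 0 by omega, gspec]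
    simp
  | succ t ih =>
    intro j0 s res hj0 hj00 hs0 hse
    rw [PySem.List.pyRange_one_cons (by omega), List.foldl_cons]
    have hclimb := climbNg_spec nums ng ((nums.length : Int) - count + j0) s nums.length s
      hpart hs0 (le_refl s) hse (by omega) (by omega) (fun k hk1 hk2 => by omega)
    set b : Int := climbNg ng ((nums.length : Int) - count + j0) nums.length s with hbdef
    obtain ⟨hb1, hb2, hbstrict, hbmax⟩ := hclimb
    rw [ih (j0 + 1) (b + 1) (res ++ [PySem.List.pyGetD nums b 0]) (by omega) (by omega)
      (by omega) (by omega)]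
    rw [gspec_step nums (count - j0) s b (by omega) hs0 (by omega) hb1 (by omega)
      (fun k hk1 hk2 => hbmax k hk1 (by omega))
      hbstrict]
    simp [show count - (j0 + 1) = count - j0 - 1 by omega]

-- the ported B equals gspec
theorem alt_eq_gspec (nums : List Int) (count : Int) :
    findlst_alt nums count = gspec nums count := by
  by_cases h0 : count ≤ 0
  · rw [findlst_alt, if_pos h0, gspec, if_pos h0]
  · push_neg at h0
    by_cases hbig : (nums.length : Int) ≤ count
    · rw [findlst_alt, if_neg (by omega), if_pos hbig, gspec, if_neg (by omega), if_pos hbig]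
    · push_neg at hbig
      have h2 : 2 ≤ nums.length := by omega
      obtain ⟨hlen, hpart⟩ := buildNg_spec nums h2
      rw [findlst_alt, if_neg (by omega), if_neg (by omega)]
      have := pickLoop_spec nums (buildNg nums) count hpart (by omega) hbig
        count.toNat 0 0 [] (by omega) (le_refl 0) (le_refl 0) (by omega)
      simpa using this

-- ===== VERDICT (by name: the statement is the Claim_ definition above) =====
theorem findlst_spec : Claim_equal_findlst := by
  intro nums count _ hpre
  unfold Spec_findlst findlst
  rw [alt_eq_gspec nums count]
  by_cases h0 : count = 0
  · subst h0; rw [if_pos rfl]; unfold gspec; simp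
  · rw [if_neg h0]
    exact main_lemma count nums hpre
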